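-- pv_equiv track=rewrite | github.com/laneashipley-create/25-26-Tier-1-Soccer-Database | sync_recordings_library.py | _excel_api_flags
-- ===== SOURCE A (Python) =====
-- def _excel_api_flags(names: set[str]) -> dict[str, bool]:
--
--     """Map JSON `apis[].name` slugs to Library Details checkbox columns."""
--
--     summary = (
--
--         "summary" in names
--
--         or "summaries" in names
--
--         or "extended-summary" in names
--
--     )
--
--     stats = "statistics" in names
--
--     lineup = "lineups" in names
--
--     timeline = "timeline" in names or "extended-timeline" in names
--
--     var_ = any(
--
--         n == "var"
--
--         or n.startswith("var-")
--
--         or n.endswith("-var")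
--
--         or "_var_" in n
--
--         or n.startswith("var_")
--
--         for n in names
--
--     )
--
--     commentary = any("commentary" in n for n in names)
--
--     win_prob = any(
--
--         "prob" in n or "win_probability" in n or "win-prob" in n or "winprob" in n
--
--         for n in names
--
--     )
--
--     return {
--
--         "Event Summary": summary,
--
--         "Event Statistics": stats,
--
--         "Event Lineup": lineup,
--
--         "Event VAR": var_,
--
--         "Event Commentary": commentary,
--
--         "Event Timeline": timeline,
--
--         "Event Win Prob": win_prob,
--
--     }
-- ===== SOURCE B (Python) =====
-- def _excel_api_flags(names: set[str]) -> dict[str, bool]: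
--     """Map JSON `apis[].name` slugs to Library Details checkbox columns."""
--     summary = stats = lineup = timeline = var_ = commentary = win_prob = False
--     for n in names:
--         if n in ("summary", "summaries", "extended-summary"):
--             summary = True
--         if n == "statistics":
--             stats = True
--         if n == "lineups":
--             lineup = True
--         if n in ("timeline", "extended-timeline"):
--             timeline = True
--         if (n == "var" or n.startswith("var-") or n.endswith("-var")
--                 or "_var_" in n or n.startswith("var_")):
--             var_ = True
--         if "commentary" in n:
--             commentary = True
--         if "prob" in n:
--             win_prob = True
--     return {
--         "Event Summary": summary,
--         "Event Statistics": stats,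
--         "Event Lineup": lineup,
--         "Event VAR": var_,
--         "Event Commentary": commentary,
--         "Event Timeline": timeline,
--         "Event Win Prob": win_prob,
--     }
-- ===== Notes on version B (the rewrite author's own statement) =====
-- stated objective: alternative
-- what changed: B replaces A's four membership tests plus three separate any() scans over names with a single pass that maintains all seven flags in one loop body, and collapses A's redundant win-prob disjunction (every alternative contains 'prob') to one substring test.
import Mathlib
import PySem

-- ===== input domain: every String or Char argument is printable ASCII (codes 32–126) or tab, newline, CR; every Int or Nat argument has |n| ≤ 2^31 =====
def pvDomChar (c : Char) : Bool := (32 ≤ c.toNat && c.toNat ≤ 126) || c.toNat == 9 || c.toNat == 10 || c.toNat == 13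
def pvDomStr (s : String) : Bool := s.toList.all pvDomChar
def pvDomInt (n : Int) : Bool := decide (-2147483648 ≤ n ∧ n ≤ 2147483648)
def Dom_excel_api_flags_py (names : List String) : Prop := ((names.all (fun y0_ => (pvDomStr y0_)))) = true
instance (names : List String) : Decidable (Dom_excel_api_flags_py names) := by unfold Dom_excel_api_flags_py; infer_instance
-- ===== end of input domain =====

-- B makes ONE pass over `names`, maintaining all seven flags together, instead of A's
-- four membership tests plus three separate any() scans (objective: alternative decomposition).

-- ===== PORT A =====
def excel_api_flags_py (names : List String) : List (String × Bool) :=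
  let summary := names.contains "summary" || names.contains "summaries"
      || names.contains "extended-summary"
  let stats := names.contains "statistics"
  let lineup := names.contains "lineups"
  let timeline := names.contains "timeline" || names.contains "extended-timeline"
  let var_ := names.any (fun n => n == "var" || PySem.Str.startswith n "var-"
      || PySem.Str.endswith n "-var" || PySem.Str.isIn "_var_" n || PySem.Str.startswith n "var_")
  let commentary := names.any (fun n => PySem.Str.isIn "commentary" n)
  let win_prob := names.any (fun n => PySem.Str.isIn "prob" n || PySem.Str.isIn "win_probability" n
      || PySem.Str.isIn "win-prob" n || PySem.Str.isIn "winprob" n)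
  [("Event Summary", summary), ("Event Statistics", stats), ("Event Lineup", lineup),
   ("Event VAR", var_), ("Event Commentary", commentary), ("Event Timeline", timeline),
   ("Event Win Prob", win_prob)]

-- ===== PORT B =====
-- one loop over names updating the 7-flag state (summary, stats, lineup, timeline, var_, commentary, win_prob)
def pvFlagsStep (st : Bool × Bool × Bool × Bool × Bool × Bool × Bool) (n : String) :
    Bool × Bool × Bool × Bool × Bool × Bool × Bool :=
  let (summary, stats, lineup, timeline, var_, commentary, win_prob) := st
  let summary := if n == "summary" || n == "summaries" || n == "extended-summary" then true else summary
  let stats := if n == "statistics" then true else stats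
  let lineup := if n == "lineups" then true else lineup
  let timeline := if n == "timeline" || n == "extended-timeline" then true else timeline
  let var_ := if n == "var" || PySem.Str.startswith n "var-" || PySem.Str.endswith n "-var"
      || PySem.Str.isIn "_var_" n || PySem.Str.startswith n "var_" then true else var_
  let commentary := if PySem.Str.isIn "commentary" n then true else commentary
  let win_prob := if PySem.Str.isIn "prob" n then true else win_prob
  (summary, stats, lineup, timeline, var_, commentary, win_prob)

def excel_api_flags_py_alt (names : List String) : List (String × Bool) :=
  let (summary, stats, lineup, timeline, var_, commentary, win_prob) :=
    names.foldl pvFlagsStep (false, false, false, false, false, false, false)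
  [("Event Summary", summary), ("Event Statistics", stats), ("Event Lineup", lineup),
   ("Event VAR", var_), ("Event Commentary", commentary), ("Event Timeline", timeline),
   ("Event Win Prob", win_prob)]

-- ===== PRECONDITION & SPEC =====
def Spec_excel_api_flags_py (names : List String) (out : List (String × Bool)) : Prop := out = excel_api_flags_py_alt names
instance (names : List String) (out : List (String × Bool)) : Decidable (Spec_excel_api_flags_py names out) := by unfold Spec_excel_api_flags_py; infer_instance

-- ===== CLAIM (what is proved, stated in full; the proofs are below) =====
def Claim_equal_excel_api_flags_py : Prop := ∀ (names : List String), Dom_excel_api_flags_py names → Spec_excel_api_flags_py names (excel_api_flags_py names)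

-- ===== LEMMAS AND PROOFS =====

-- Each flag component of the fold is its initial value OR-ed with an `any` over names.
theorem pvFold_flags (names : List String) (a b c d e f g : Bool) :
    names.foldl pvFlagsStep (a, b, c, d, e, f, g) =
      (a || names.any (fun n => n == "summary" || n == "summaries" || n == "extended-summary"),
       b || names.any (fun n => n == "statistics"),
       c || names.any (fun n => n == "lineups"),
       d || names.any (fun n => n == "timeline" || n == "extended-timeline"),
       e || names.any (fun n => n == "var" || PySem.Str.startswith n "var-"
           || PySem.Str.endswith n "-var" || PySem.Str.isIn "_var_" n || PySem.Str.startswith n "var_"),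
       f || names.any (fun n => PySem.Str.isIn "commentary" n),
       g || names.any (fun n => PySem.Str.isIn "prob" n)) := by
  have hif : ∀ (c v : Bool), (if c = true then true else v) = (v || c) := by decide
  induction names generalizing a b c d e f g with
  | nil => simp
  | cons x xs ih =>
      simp only [List.foldl_cons, List.any_cons, pvFlagsStep, hif]
      rw [ih]
      simp only [Bool.or_assoc]

theorem contains_eq_any (l : List String) (s : String) :
    l.contains s = l.any (fun n => n == s) := by
  induction l with
  | nil => rfl
  | cons x xs ih =>
      have hx : (s == x) = (x == s) := by
        by_cases hxy : s = x
        · subst hxy; rfl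
        · simp [hxy, Ne.symm hxy]
      simp only [List.contains_cons, List.any_cons, ih, hx]

theorem any_or (l : List String) (p q : String → Bool) :
    l.any (fun n => p n || q n) = (l.any p || l.any q) := by
  induction l with
  | nil => rfl
  | cons x xs ih =>
      simp only [List.any_cons, ih]
      cases p x <;> cases q x <;> simp

-- A's extra win-prob alternatives all contain "prob", so the whole disjunction is just `"prob" in n`.
theorem winprob_pred_eq (n : String) :
    (PySem.Str.isIn "prob" n || PySem.Str.isIn "win_probability" n
      || PySem.Str.isIn "win-prob" n || PySem.Str.isIn "winprob" n) = PySem.Str.isIn "prob" n := by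
  cases h : PySem.Str.isIn "prob" n with
  | true => simp
  | false =>
      have h' : PySem.Chars.isIn "prob".toList n.toList = false := by simpa using h
      have hp : ¬ ("prob".toList <:+: n.toList) := by
        intro hin
        rw [← PySem.Chars.isIn_iff_infix, h'] at hin
        exact absurd hin (by simp)
      have aux : ∀ (sub : List Char), ("prob".toList <:+: sub) →
          PySem.Chars.isIn sub n.toList = false := by
        intro sub hsub
        rw [← Bool.not_eq_true, PySem.Chars.isIn_iff_infix]
        exact fun hin => hp (hsub.trans hin)
      simp [h']
      exact ⟨⟨aux _ (by decide), aux _ (by decide)⟩, aux _ (by decide)⟩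

-- ===== VERDICT (by name: the statement is the Claim_ definition above) =====
theorem excel_api_flags_py_spec : Claim_equal_excel_api_flags_py := by
  intro names _
  unfold Spec_excel_api_flags_py excel_api_flags_py excel_api_flags_py_alt
  rw [pvFold_flags]
  simp only [Bool.false_or, winprob_pred_eq, any_or, contains_eq_any]
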